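-- pv_equiv track=rewrite | github.com/hiepnguyen034/Graph-algorithms | graph-algorithm.py | shortest_list
-- ===== SOURCE A (Python) =====
-- def shortest_list(lists):
--     """
--     Purpose: this function takes a list of list and return the shortest list in the
--     list of list
--     Argument: a list of list
--     Output: the shortest list in the list of list
--     """
--     lengths=[]
--     for sublist in lists:
--         lengths.append(len(sublist))
--     shortest=min(lengths)
--     for sublist in lists:
--         if len(sublist)==shortest:
--             return sublist
-- ===== SOURCE B (Python) =====
-- def shortest_list(lists):
--     best = None
--     for sublist in lists:
--         if best is None or len(sublist) < len(best):
--             best = sublist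
--     if best is None:
--         raise ValueError("min() arg is an empty sequence")
--     return best
-- ===== Notes on version B (the rewrite author's own statement) =====
-- stated objective: simpler
-- what changed: Single pass keeping the current best (strictly shorter wins, so the first tied sublist is kept), instead of building a list of lengths, taking min, and rescanning for the first match.
import Mathlib
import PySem

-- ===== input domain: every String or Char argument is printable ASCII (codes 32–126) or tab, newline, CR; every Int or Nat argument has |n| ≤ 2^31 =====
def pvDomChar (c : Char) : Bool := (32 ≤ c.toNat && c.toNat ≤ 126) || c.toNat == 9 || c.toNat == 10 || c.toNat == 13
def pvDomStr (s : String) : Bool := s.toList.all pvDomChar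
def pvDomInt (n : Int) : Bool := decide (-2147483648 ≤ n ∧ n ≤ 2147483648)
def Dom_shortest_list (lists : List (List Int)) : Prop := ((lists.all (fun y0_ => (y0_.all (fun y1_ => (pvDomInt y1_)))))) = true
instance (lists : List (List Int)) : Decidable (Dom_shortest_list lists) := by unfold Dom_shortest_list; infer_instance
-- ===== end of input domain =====

-- B replaces A's build-lengths/min/rescan with a single pass keeping the current best (strict <, so the first tied sublist is kept); simpler, same cost.


-- ===== PORT A =====
-- second loop of A: return the first sublist whose length equals `shortest`
-- (Python falls off the loop returning None only when no sublist matches, which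
-- cannot happen since `shortest` is the min of the lengths; [] is a placeholder)
def scanA : List (List Int) → Nat → List Int
  | [], _ => []
  | s :: rest, m => if s.length = m then s else scanA rest m

def shortest_list (lists : List (List Int)) : List Int :=
  let lengths := lists.foldl (fun acc s => acc ++ [s.length]) []
  match PySem.List.min? lengths (fun x => x) with
  | none => []   -- Python: min([]) raises ValueError; excluded by Pre_
  | some shortest => scanA lists shortest

-- ===== PORT B =====
-- B's loop: best starts as none; a strictly shorter sublist replaces it
def bestLoop : List (List Int) → Option (List Int) → Option (List Int)
  | [], best => best
  | s :: rest, best =>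
      bestLoop rest (match best with
        | none => some s
        | some b => if s.length < b.length then some s else some b)

def shortest_list_alt (lists : List (List Int)) : List Int :=
  match bestLoop lists none with
  | none => []   -- Python B: raise ValueError; excluded by Pre_
  | some b => b

-- ===== PRECONDITION & SPEC =====
-- A raises ValueError (min of an empty sequence) on the empty list; B raises there too.
def Pre_shortest_list (lists : List (List Int)) : Prop := lists ≠ []
instance (lists : List (List Int)) : Decidable (Pre_shortest_list lists) := by unfold Pre_shortest_list; infer_instance
def pvWitness_shortest_list : List (List Int) := [[1, 2], [3], [4, 5, 6]]

def Spec_shortest_list (lists : List (List Int)) (out : List Int) : Prop := out = shortest_list_alt lists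
instance (lists : List (List Int)) (out : List Int) : Decidable (Spec_shortest_list lists out) := by unfold Spec_shortest_list; infer_instance

-- ===== CLAIM (what is proved, stated in full; the proofs are below) =====
def Claim_equal_shortest_list : Prop := ∀ (lists : List (List Int)), Dom_shortest_list lists → Pre_shortest_list lists → Spec_shortest_list lists (shortest_list lists)

-- ===== LEMMAS AND PROOFS =====

-- the common reference: first sublist of minimal length, as a fold with the current best
def fmin (b : List Int) : List (List Int) → List Int
  | [] => b
  | s :: rest => if s.length < b.length then fmin s rest else fmin b rest

theorem bestLoop_some (l : List (List Int)) (b : List Int) :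
    bestLoop l (some b) = some (fmin b l) := by
  induction l generalizing b with
  | nil => rfl
  | cons s rest ih =>
      simp only [bestLoop, fmin]
      split_ifs <;> exact ih _

theorem alt_cons (s : List Int) (rest : List (List Int)) :
    shortest_list_alt (s :: rest) = fmin s rest := by
  simp [shortest_list_alt, bestLoop, bestLoop_some]

theorem foldl_app_lengths (l : List (List Int)) (acc : List Nat) :
    l.foldl (fun a s => a ++ [s.length]) acc = acc ++ l.map List.length := by
  induction l generalizing acc with
  | nil => simp
  | cons s rest ih => simp [List.foldl, ih]

theorem lengths_eq (lists : List (List Int)) :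
    lists.foldl (fun acc s => acc ++ [s.length]) [] = lists.map List.length := by
  simpa using foldl_app_lengths lists []

theorem min?_map_cons (s : List Int) (rest : List (List Int)) :
    PySem.List.min? ((s :: rest).map List.length) (fun x => x)
      = some ((rest.map List.length).foldl min s.length) := by
  simp [PySem.List.min?_id_cons]

-- min of the lengths, as a fold
theorem foldl_min_le (a : Nat) (l : List Nat) : l.foldl min a ≤ a := by
  induction l generalizing a with
  | nil => simp
  | cons x t ih => exact le_trans (ih _) (Nat.min_le_left a x)

-- the key lemma: scanning for the first sublist of minimal length = the running-best fold
theorem scan_eq_fmin (s : List Int) (rest : List (List Int)) :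
    scanA (s :: rest) ((rest.map List.length).foldl min s.length) = fmin s rest := by
  induction rest generalizing s with
  | nil => simp [scanA, fmin]
  | cons t rs ih =>
      simp only [List.map, List.foldl]
      by_cases h : t.length < s.length
      · -- t strictly shorter: s can never match the min; reduces to the scan of t :: rs
        have hmin : min s.length t.length = t.length := Nat.min_eq_right (Nat.le_of_lt h)
        rw [hmin]
        have hle : (rs.map List.length).foldl min t.length ≤ t.length := foldl_min_le _ _
        have hne : s.length ≠ (rs.map List.length).foldl min t.length := by omega
        simp only [scanA, if_neg hne]
        have := ih t
        simp only [scanA] at this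
        simp [fmin, h, this]
      · -- s.length ≤ t.length: t irrelevant, min unchanged; reduces to scan of s :: rs
        have hmin : min s.length t.length = s.length := Nat.min_eq_left (Nat.le_of_not_lt h)
        rw [hmin]
        have hthis := ih s
        have hle : (rs.map List.length).foldl min s.length ≤ s.length := foldl_min_le _ _
        have hf : fmin s (t :: rs) = fmin s rs := by simp [fmin, h]
        rw [hf, ← hthis]
        by_cases hs : s.length = (rs.map List.length).foldl min s.length
        · simp [scanA, ← hs]
        · have ht : t.length ≠ (rs.map List.length).foldl min s.length := by omega
          simp [scanA, hs, ht]

-- ===== VERDICT (by name: the statement is the Claim_ definition above) =====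
theorem shortest_list_spec : Claim_equal_shortest_list := by
  intro lists _ hpre
  unfold Spec_shortest_list
  match lists with
  | [] => exact absurd rfl hpre
  | s :: rest =>
      rw [alt_cons]
      unfold shortest_list
      simp only [lengths_eq, min?_map_cons]
      exact scan_eq_fmin s rest
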